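-- pv_equiv track=rewrite | github.com/savannah030/ALGORITHM_old | python/BOJ/2021-05-14_1292_수열합.py | caculateSum
-- ===== SOURCE A (Python) =====
-- def caculateSum(x):
--     sum = 0
--     num = 1
--     # 이 문제는 while t: t--보다 그냥 for _ in range(t)쓰는 게 가독성 더 좋은듯
--     for _ in range(x):
--         count = num
--         for _ in range(count):
--             if x==0: break
--             sum += num
--             x -= 1
--         num += 1
--     return sum
-- ===== SOURCE B (Python) =====
-- def caculateSum(x):
--     # O(sqrt(x)): consume whole blocks k (k copies of k, contributing k*k),
--     # then add the partial block x*k.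
--     if x <= 0:
--         return 0
--     total = 0
--     k = 1
--     while x >= k:
--         total += k * k
--         x -= k
--         k += 1
--     return total + x * k
-- ===== Notes on version B (the rewrite author's own statement) =====
-- stated objective: faster
-- what changed: Replaces the O(x) term-by-term double loop with an O(sqrt(x)) loop over whole blocks (block k contributes k*k) plus one partial-block product.
import Mathlib
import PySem

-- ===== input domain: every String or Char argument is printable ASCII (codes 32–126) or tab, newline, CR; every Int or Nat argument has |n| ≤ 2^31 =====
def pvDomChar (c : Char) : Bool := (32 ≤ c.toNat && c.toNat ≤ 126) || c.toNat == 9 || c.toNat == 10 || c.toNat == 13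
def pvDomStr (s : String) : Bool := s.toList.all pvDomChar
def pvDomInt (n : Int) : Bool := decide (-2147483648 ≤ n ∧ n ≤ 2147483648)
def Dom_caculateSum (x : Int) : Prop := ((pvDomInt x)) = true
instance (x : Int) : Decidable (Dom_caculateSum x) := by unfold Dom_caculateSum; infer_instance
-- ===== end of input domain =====

-- B replaces A's O(x) term-by-term double loop with an O(sqrt(x)) whole-block loop (objective: faster).

-- ===== PORT A =====
-- inner 'for _ in range(count)' loop: state (sum, x); 'if x==0: break' then 'sum += num; x -= 1'
def pvInnerA (count : Nat) (num : Int) (sum : Int) (x : Int) : Int × Int :=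
  match count with
  | 0 => (sum, x)
  | c + 1 => if x = 0 then (sum, x) else pvInnerA c num (sum + num) (x - 1)

-- outer 'for _ in range(x)' loop: state (sum, num, x); count = num each iteration, then num += 1
def pvOuterA (n : Nat) (sum : Int) (num : Int) (x : Int) : Int :=
  match n with
  | 0 => sum
  | m + 1 =>
      let p := pvInnerA num.toNat num sum x
      pvOuterA m p.1 (num + 1) p.2

def caculateSum (x : Int) : Int := pvOuterA x.toNat 0 1 x

-- ===== PORT B =====
-- 'while x >= k' loop of Source B; fuel bounds the iteration count (the loop subtracts k ≥ 1 from x each step)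
def pvBLoop (fuel : Nat) (x : Int) (k : Int) (total : Int) : Int :=
  match fuel with
  | 0 => total + x * k
  | f + 1 => if x ≥ k then pvBLoop f (x - k) (k + 1) (total + k * k) else total + x * k

def caculateSum_alt (x : Int) : Int :=
  if x ≤ 0 then 0 else pvBLoop x.toNat x 1 0

-- ===== PRECONDITION & SPEC =====
def Spec_caculateSum (x : Int) (out : Int) : Prop := out = caculateSum_alt x
instance (x : Int) (out : Int) : Decidable (Spec_caculateSum x out) := by unfold Spec_caculateSum; infer_instance

-- ===== CLAIM (what is proved, stated in full; the proofs are below) =====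
def Claim_equal_caculateSum : Prop := ∀ (x : Int), Dom_caculateSum x → Spec_caculateSum x (caculateSum x)

-- ===== LEMMAS AND PROOFS =====

-- inner loop with x = 0 breaks immediately every step
theorem pvInnerA_zero (c : Nat) (num sum : Int) : pvInnerA c num sum 0 = (sum, 0) := by
  cases c <;> simp [pvInnerA]

-- full block: with x ≥ c the inner loop runs all c steps, adding c·num and removing c from x
theorem pvInnerA_full (c : Nat) (num sum x : Int) (h : (c : Int) ≤ x) :
    pvInnerA c num sum x = (sum + c * num, x - c) := by
  induction c generalizing sum x with
  | zero => simp [pvInnerA]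
  | succ m ih =>
      have hx : x ≠ 0 := by push_cast at h; omega
      simp only [pvInnerA, hx, ite_false]
      rw [ih (sum + num) (x - 1) (by push_cast at h ⊢; omega)]
      simp only [Prod.mk.injEq]
      constructor <;> (push_cast; ring)

-- partial block: with 0 ≤ x < c the inner loop stops at x = 0 after adding x·num
theorem pvInnerA_partial (c : Nat) (num sum x : Int) (h0 : 0 ≤ x) (h : x < (c : Int)) :
    pvInnerA c num sum x = (sum + x * num, 0) := by
  induction c generalizing sum x with
  | zero => omega
  | succ m ih =>
      by_cases hx : x = 0
      · subst hx; simp [pvInnerA]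
      · simp only [pvInnerA, hx, ite_false]
        rw [ih (sum + num) (x - 1) (by omega) (by push_cast at h ⊢; omega)]
        exact Prod.ext (by ring) rfl

-- once x = 0 the remaining outer iterations do nothing
theorem pvOuterA_zero (n : Nat) (sum num : Int) : pvOuterA n sum num 0 = sum := by
  induction n generalizing sum num with
  | zero => rfl
  | succ m ih => simp [pvOuterA, pvInnerA_zero, ih]

-- main invariant: with enough fuel, A's outer loop equals B's block loop
theorem pvMain (n : Nat) (sum k x : Int) (hx : 0 ≤ x) (hk : 1 ≤ k) (hn : x ≤ (n : Int)) :
    pvOuterA n sum k x = pvBLoop n x k sum := by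
  induction n generalizing sum k x with
  | zero => simp at hn; simp [pvOuterA, pvBLoop]; omega
  | succ m ih =>
      by_cases hge : x ≥ k
      · have hkx : (k.toNat : Int) ≤ x := by omega
        simp only [pvOuterA, pvBLoop, hge, if_pos]
        rw [pvInnerA_full _ _ _ _ hkx]
        have h1 : (k.toNat : Int) = k := by omega
        rw [h1]
        have := ih (sum + k * k) (k + 1) (x - k) (by omega) (by omega) (by push_cast at hn ⊢; omega)
        simpa [mul_comm] using this
      · have hlt : x < (k.toNat : Int) := by omega
        simp only [pvOuterA, pvBLoop, hge, ite_false]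
        rw [pvInnerA_partial _ _ _ _ hx hlt]
        simp [pvOuterA_zero, mul_comm]

-- ===== VERDICT (by name: the statement is the Claim_ definition above) =====
theorem caculateSum_spec : Claim_equal_caculateSum := by
  intro x _
  unfold Spec_caculateSum caculateSum caculateSum_alt
  by_cases h : x ≤ 0
  · have : x.toNat = 0 := by omega
    simp [this, pvOuterA, h]
  · have hx : 0 ≤ x := by omega
    rw [if_neg h, pvMain x.toNat 0 1 x hx (by omega) (by omega)]
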